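-- pv_equiv track=rewrite | github.com/cchu70/perfect_mapper | mapQ _and_order/unique_kmer_order_score.py | score_correct_incorrect_ordering
-- ===== SOURCE A (Python) =====
-- def score_correct_incorrect_ordering(start, end, read_kmer_idx):
-- 	# Go through each alignment of the previous read
-- 	score = 0
-- 	begin = False
-- 	ref_idx_prev = 0
--
-- 	for ref_idx in read_kmer_idx:
--
-- 		if (ref_idx >= start and ref_idx <= end):
-- 			if (not begin):
-- 				# Intitialize
-- 				ref_idx_prev = ref_idx
-- 				begin = True
-- 			else:
-- 				if (ref_idx > ref_idx_prev):
-- 					score = score + 1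
-- 				else:
-- 					score = score - penalty
-- 				#####
--
-- 				# Update
-- 				ref_idx_prev = ref_idx
-- 			#####
-- 		#####
-- 	#####
-- 	return score
--
-- penalty = 0
-- ===== SOURCE B (Python) =====
-- penalty = 0
--
-- def _runs(l):
--     """Number of maximal strictly increasing runs of l."""
--     r = 0
--     i = 0
--     n = len(l)
--     while i < n:
--         r += 1              # a new run starts here
--         i += 1
--         while i < n and l[i] > l[i - 1]:
--             i += 1          # extend the current run
--     return r
--
-- def score_correct_incorrect_ordering(start, end, read_kmer_idx):
--     kept = [x for x in read_kmer_idx if start <= x <= end]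
--     if not kept:
--         return 0
--     r = _runs(kept)
--     # ascents = len(kept) - r, non-ascents = r - 1
--     return (len(kept) - r) - penalty * (r - 1)
-- ===== Notes on version B (the rewrite author's own statement) =====
-- stated objective: alternative
-- what changed: Replaces A's interleaved begin/ref_idx_prev state machine that scores each adjacent pair by a run-counting algorithm: filter the in-range indices, count the maximal strictly increasing runs, and obtain the score from the closed formula (len(kept)-r) - penalty*(r-1).
import Mathlib
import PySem

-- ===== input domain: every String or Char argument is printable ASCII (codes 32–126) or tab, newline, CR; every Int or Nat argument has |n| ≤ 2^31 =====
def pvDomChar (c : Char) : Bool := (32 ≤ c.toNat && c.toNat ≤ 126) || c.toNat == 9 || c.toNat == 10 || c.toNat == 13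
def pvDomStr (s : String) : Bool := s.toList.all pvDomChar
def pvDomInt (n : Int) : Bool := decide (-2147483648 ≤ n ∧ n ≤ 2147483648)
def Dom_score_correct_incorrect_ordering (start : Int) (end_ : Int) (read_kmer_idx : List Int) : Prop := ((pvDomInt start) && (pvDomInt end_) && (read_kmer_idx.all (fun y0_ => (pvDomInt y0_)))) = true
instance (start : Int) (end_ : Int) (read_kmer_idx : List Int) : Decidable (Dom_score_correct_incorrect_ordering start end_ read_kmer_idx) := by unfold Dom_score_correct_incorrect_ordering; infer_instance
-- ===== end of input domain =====

-- B replaces A's interleaved pair-scoring state machine by run counting plus a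
-- closed arithmetic formula (len(kept)-r) - penalty*(r-1); objective: alternative.

-- ===== PORT A =====
-- module-level constant `penalty = 0`
def pvPenalty : Int := 0

-- one iteration of A's for-loop over the state (score, begin, ref_idx_prev)
def pvStepA (start end_ : Int) (st : Int × Bool × Int) (ref_idx : Int) : Int × Bool × Int :=
  if ref_idx ≥ start ∧ ref_idx ≤ end_ then
    if st.2.1 = false then (st.1, true, ref_idx)
    else ((if ref_idx > st.2.2 then st.1 + 1 else st.1 - pvPenalty), true, ref_idx)
  else st

def score_correct_incorrect_ordering (start : Int) (end_ : Int) (read_kmer_idx : List Int) : Int :=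
  (read_kmer_idx.foldl (pvStepA start end_) (0, false, 0)).1

-- ===== PORT B =====
-- B's `_runs` index loop, as the equivalent structural recursion over the suffix of l:
-- pvRuns l = the outer `while i < n` iteration at a run start; pvSkip p t = the inner
-- `while … l[i] > l[i-1]` loop, p being l[i-1].
mutual
def pvRuns : List Int → Int
  | [] => 0
  | a :: t => 1 + pvSkip a t
  termination_by l => (l.length, 0)
def pvSkip : Int → List Int → Int
  | _, [] => 0
  | p, b :: t => if b > p then pvSkip b t else pvRuns (b :: t)
  termination_by p l => (l.length, 1)
end

def score_correct_incorrect_ordering_alt (start : Int) (end_ : Int) (read_kmer_idx : List Int) : Int :=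
  let kept := read_kmer_idx.filter (fun x => decide (start ≤ x) && decide (x ≤ end_))
  if kept = [] then 0
  else
    let r := pvRuns kept
    ((kept.length : Int) - r) - pvPenalty * (r - 1)

-- ===== PRECONDITION & SPEC =====
def Spec_score_correct_incorrect_ordering (start : Int) (end_ : Int) (read_kmer_idx : List Int) (out : Int) : Prop := out = score_correct_incorrect_ordering_alt start end_ read_kmer_idx
instance (start : Int) (end_ : Int) (read_kmer_idx : List Int) (out : Int) : Decidable (Spec_score_correct_incorrect_ordering start end_ read_kmer_idx out) := by unfold Spec_score_correct_incorrect_ordering; infer_instance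

-- ===== CLAIM (what is proved, stated in full; the proofs are below) =====
def Claim_equal_score_correct_incorrect_ordering : Prop := ∀ (start : Int) (end_ : Int) (read_kmer_idx : List Int), Dom_score_correct_incorrect_ordering start end_ read_kmer_idx → Spec_score_correct_incorrect_ordering start end_ read_kmer_idx (score_correct_incorrect_ordering start end_ read_kmer_idx)

-- ===== LEMMAS AND PROOFS =====

-- A's adjacent-pair score of a list (proof-only characterisation of A's loop)
def pvPair (l : List Int) : Int :=
  ((l.zip l.tail).map (fun p => if p.2 > p.1 then (1 : Int) else -pvPenalty)).sum

theorem pvPair_cons_cons (a b : Int) (t : List Int) :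
    pvPair (a :: b :: t) = (if b > a then (1 : Int) else -pvPenalty) + pvPair (b :: t) := by
  simp [pvPair, List.zip]

-- A's loop with begin = true and previous index p scores p prepended to the kept tail
theorem loopA_true (start end_ : Int) (xs : List Int) :
    ∀ (s p : Int),
      (xs.foldl (pvStepA start end_) (s, true, p)).1 =
        s + pvPair (p :: xs.filter (fun x => decide (start ≤ x) && decide (x ≤ end_))) := by
  induction xs with
  | nil => intro s p; simp [pvPair]
  | cons x xs ih =>
    intro s p
    by_cases hx : x ≥ start ∧ x ≤ end_
    · have hstep : pvStepA start end_ (s, true, p) x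
          = ((if x > p then s + 1 else s - pvPenalty), true, x) := by
        simp [pvStepA, hx]
      rw [List.foldl_cons, hstep, ih,
        List.filter_cons_of_pos (by simp [hx.1, hx.2]), pvPair_cons_cons]
      split_ifs <;> ring
    · have hstep : pvStepA start end_ (s, true, p) x = (s, true, p) := by
        simp [pvStepA, hx]
      rw [List.foldl_cons, hstep,
        List.filter_cons_of_neg (by rcases (not_and_or.mp hx) with h | h <;> simp [h])]
      exact ih s p

-- A's loop with begin = false scores exactly the kept list (any stale prev)
theorem loopA_false (start end_ : Int) (xs : List Int) :
    ∀ (s p : Int),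
      (xs.foldl (pvStepA start end_) (s, false, p)).1 =
        s + pvPair (xs.filter (fun x => decide (start ≤ x) && decide (x ≤ end_))) := by
  induction xs with
  | nil => intro s p; simp [pvPair]
  | cons x xs ih =>
    intro s p
    by_cases hx : x ≥ start ∧ x ≤ end_
    · have hstep : pvStepA start end_ (s, false, p) x = (s, true, x) := by
        simp [pvStepA, hx]
      rw [List.foldl_cons, hstep,
        List.filter_cons_of_pos (by simp [hx.1, hx.2])]
      exact loopA_true start end_ xs s x
    · have hstep : pvStepA start end_ (s, false, p) x = (s, false, p) := by
        simp [pvStepA, hx]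
      rw [List.foldl_cons, hstep,
        List.filter_cons_of_neg (by rcases (not_and_or.mp hx) with h | h <;> simp [h])]
      exact ih s p

-- the pair score of a nonempty list in terms of the inner-loop run counter
theorem pvPair_eq_skip (t : List Int) :
    ∀ p : Int, pvPair (p :: t) = (t.length : Int) - pvSkip p t := by
  induction t with
  | nil => intro p; simp [pvPair, pvSkip]
  | cons b t ih =>
    intro p
    rw [pvPair_cons_cons, ih b]
    by_cases hbp : b > p
    · simp [pvSkip, hbp]; ring
    · simp [pvSkip, hbp, pvRuns, pvPenalty]; ring

-- ===== VERDICT (by name: the statement is the Claim_ definition above) =====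
theorem score_correct_incorrect_ordering_spec : Claim_equal_score_correct_incorrect_ordering := by
  intro start end_ xs _
  show score_correct_incorrect_ordering start end_ xs = _
  simp only [score_correct_incorrect_ordering, score_correct_incorrect_ordering_alt,
    loopA_false start end_ xs 0 0, zero_add]
  cases h : xs.filter (fun x => decide (start ≤ x) && decide (x ≤ end_)) with
  | nil => simp [pvPair]
  | cons a t =>
    simp only [pvPair_eq_skip t a, pvRuns, pvPenalty, List.length_cons]
    push_cast; ring
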